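-- pv_equiv track=rewrite | github.com/unbridledpc/AgentX | AgentX/agentx/core/reflection.py | infer_modules
-- ===== SOURCE A (Python) =====
-- from typing import Any, Iterable
--
-- def infer_modules(paths: Iterable[str]) -> list[str]:
--     modules: list[str] = []
--     for path in paths:
--         p = str(path).replace("\\", "/").strip()
--         parts = [x for x in p.split("/") if x]
--         if not parts:
--             continue
--         module = ""
--         if "core" in parts:
--             idx = parts.index("core")
--             module = parts[idx + 1].removesuffix(".py") if idx + 1 < len(parts) else "core"
--         elif "tools" in parts:
--             idx = parts.index("tools")
--             module = parts[idx + 1].removesuffix(".py") if idx + 1 < len(parts) else "tools"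
--         elif "jobs" in parts:
--             idx = parts.index("jobs")
--             module = parts[idx + 1].removesuffix(".py") if idx + 1 < len(parts) else "jobs"
--         elif len(parts) >= 2:
--             module = parts[-2]
--         else:
--             module = parts[0].removesuffix(".py")
--         if module and module not in modules:
--             modules.append(module)
--     return modules[:20]
-- ===== SOURCE B (Python) =====
-- PRIORITY = {"core": 0, "tools": 1, "jobs": 2}
--
-- def _module_of(path):
--     parts = [x for x in str(path).replace("\\", "/").strip().split("/") if x]
--     best = None  # (priority, index) of the best marker seen so far
--     for i, part in enumerate(parts):
--         pr = PRIORITY.get(part)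
--         if pr is not None and (best is None or pr < best[0]):
--             best = (pr, i)
--     if best is not None:
--         i = best[1]
--         return parts[i + 1].removesuffix(".py") if i + 1 < len(parts) else parts[i]
--     if len(parts) >= 2:
--         return parts[-2]
--     if parts:
--         return parts[0].removesuffix(".py")
--     return ""
--
-- def infer_modules(paths):
--     modules = []
--     for path in paths:
--         if len(modules) == 20:
--             break
--         m = _module_of(path)
--         if m and m not in modules:
--             modules.append(m)
--     return modules
-- ===== Notes on version B (the rewrite author's own statement) =====
-- stated objective: faster
-- what changed: Per path, B finds the marker by a single one-pass minimum-priority scan over the parts (tracking the best (priority,index) pair) instead of A's three sequential elif branches each doing a membership test plus .index rescan, and B's outer loop stops as soon as 20 modules are collected instead of appending to an ever-growing dedup list over all paths and slicing [:20] at the end.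
import Mathlib
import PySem

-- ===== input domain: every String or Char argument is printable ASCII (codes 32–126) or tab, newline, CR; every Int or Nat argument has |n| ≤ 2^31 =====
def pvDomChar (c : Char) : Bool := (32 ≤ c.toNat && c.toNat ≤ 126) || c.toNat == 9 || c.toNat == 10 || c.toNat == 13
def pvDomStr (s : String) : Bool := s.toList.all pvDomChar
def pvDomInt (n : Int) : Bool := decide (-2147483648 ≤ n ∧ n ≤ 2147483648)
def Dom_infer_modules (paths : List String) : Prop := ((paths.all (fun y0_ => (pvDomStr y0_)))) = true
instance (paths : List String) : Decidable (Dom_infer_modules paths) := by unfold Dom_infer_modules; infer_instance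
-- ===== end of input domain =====

-- B replaces A's three hard-coded elif branches (membership test + .index per keyword) by a
-- single one-pass minimum-priority scan over the path parts, and A's process-everything-then-
-- slice[:20] loop by a loop whose dedup list never exceeds 20 and stops at 20 (objective: faster).

-- s.removesuffix(suf) for nonempty suf: hand port, exact (endswith test, then drop the suffix)
def pvRemoveSuffix (s suf : String) : String :=
  if PySem.Str.endswith s suf then String.ofList (s.toList.take (s.toList.length - suf.toList.length))
  else s

-- ===== PORT A =====
def infer_modules (paths : List String) : List String :=
  PySem.List.slice (paths.foldl (fun modules path =>
    let p := PySem.Str.strip (PySem.Str.replace path "\\" "/")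
    let parts := ((PySem.Str.split? p "/").getD []).filter (fun x => x != "")
    if parts = [] then modules
    else
      let module :=
        if parts.contains "core" then
          let idx := (PySem.List.index? parts "core").getD 0
          if idx + 1 < parts.length then pvRemoveSuffix (parts.getD (idx + 1) "") ".py" else "core"
        else if parts.contains "tools" then
          let idx := (PySem.List.index? parts "tools").getD 0
          if idx + 1 < parts.length then pvRemoveSuffix (parts.getD (idx + 1) "") ".py" else "tools"
        else if parts.contains "jobs" then
          let idx := (PySem.List.index? parts "jobs").getD 0
          if idx + 1 < parts.length then pvRemoveSuffix (parts.getD (idx + 1) "") ".py" else "jobs"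
        else if 2 ≤ parts.length then PySem.List.pyGetD parts (-2) ""
        else pvRemoveSuffix (parts.getD 0 "") ".py"
      if module != "" && !(modules.contains module) then modules ++ [module] else modules) [])
    none (some 20)

-- ===== PORT B =====
-- PRIORITY = {"core": 0, "tools": 1, "jobs": 2}
def pvPriority : PySem.Dict String Int := PySem.Dict.ofList [("core", 0), ("tools", 1), ("jobs", 2)]

-- the loop body of _module_of's scan: keep the (priority, index) of the best marker so far
def pvScanStep (best : Option (Int × Int)) (ip : Int × String) : Option (Int × Int) :=
  match PySem.Dict.get? pvPriority ip.2 with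
  | none => best
  | some pr =>
    match best with
    | none => some (pr, ip.1)
    | some b => if pr < b.1 then some (pr, ip.1) else some b

def pvPartsOf (path : String) : List String :=
  ((PySem.Str.split? (PySem.Str.strip (PySem.Str.replace path "\\" "/")) "/").getD []).filter
    (fun x => x != "")

def pvModuleOf (path : String) : String :=
  let parts := pvPartsOf path
  match (PySem.List.enumerate parts).foldl pvScanStep none with
  | some b =>
    if b.2 + 1 < (parts.length : Int) then pvRemoveSuffix (PySem.List.pyGetD parts (b.2 + 1) "") ".py"
    else PySem.List.pyGetD parts b.2 ""
  | none =>
    if 2 ≤ parts.length then PySem.List.pyGetD parts (-2) ""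
    else if parts ≠ [] then pvRemoveSuffix (parts.getD 0 "") ".py"
    else ""

-- the main loop: stop as soon as 20 modules are collected
def pvCollect (modules : List String) : List String → List String
  | [] => modules
  | path :: rest =>
    if modules.length = 20 then modules
    else
      let m := pvModuleOf path
      pvCollect (if m != "" && !(modules.contains m) then modules ++ [m] else modules) rest

def infer_modules_alt (paths : List String) : List String := pvCollect [] paths

-- ===== PRECONDITION & SPEC =====
def Spec_infer_modules (paths : List String) (out : List String) : Prop := out = infer_modules_alt paths
instance (paths : List String) (out : List String) : Decidable (Spec_infer_modules paths out) := by unfold Spec_infer_modules; infer_instance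

-- ===== CLAIM (what is proved, stated in full; the proofs are below) =====
def Claim_equal_infer_modules : Prop := ∀ (paths : List String), Dom_infer_modules paths → Spec_infer_modules paths (infer_modules paths)

-- ===== LEMMAS AND PROOFS =====

theorem pvPriority_get (x : String) : PySem.Dict.get? pvPriority x =
    (if x = "core" then some 0 else if x = "tools" then some 1 else if x = "jobs" then some 2 else none) := by
  rw [show pvPriority = PySem.Dict.mk [("core", 0), ("tools", 1), ("jobs", 2)] from by decide]
  rw [PySem.Dict.get?_mk_cons, PySem.Dict.get?_mk_cons, PySem.Dict.get?_mk_cons,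
      show PySem.Dict.get? (PySem.Dict.mk ([] : List (String × Int))) x = none from rfl]
  split_ifs <;> simp_all [beq_iff_eq]

-- what the one-pass scan computes: the priority of the best marker present and its FIRST index
def pvScanSpec (parts : List String) (s : Int) : Option (Int × Int) :=
  if parts.contains "core" then some (0, s + (((PySem.List.index? parts "core").getD 0 : Nat) : Int))
  else if parts.contains "tools" then some (1, s + (((PySem.List.index? parts "tools").getD 0 : Nat) : Int))
  else if parts.contains "jobs" then some (2, s + (((PySem.List.index? parts "jobs").getD 0 : Nat) : Int))
  else none

-- merging two partial scan results (left = earlier; ties keep the left, as the strict '<' does)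
def pvMerge (a b : Option (Int × Int)) : Option (Int × Int) :=
  match a, b with
  | none, b => b
  | some a, none => some a
  | some a, some b => if b.1 < a.1 then some b else some a

theorem pv_step_merge (acc : Option (Int × Int)) (ip : Int × String) :
    pvScanStep acc ip = pvMerge acc (pvScanStep none ip) := by
  unfold pvScanStep pvMerge
  cases PySem.Dict.get? pvPriority ip.2 <;> cases acc <;> simp

theorem pv_merge_assoc (a b c : Option (Int × Int)) :
    pvMerge (pvMerge a b) c = pvMerge a (pvMerge b c) := by
  rcases a with _ | ⟨pa, ia⟩ <;> rcases b with _ | ⟨pb, ib⟩ <;> rcases c with _ | ⟨pc, ic⟩ <;>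
    simp only [pvMerge] <;> (try split_ifs) <;> (try simp_all) <;> (try split_ifs) <;>
    (try simp_all) <;> (try intros) <;> first | rfl | omega

theorem pv_foldl_merge (l : List (Int × String)) (acc : Option (Int × Int)) :
    l.foldl pvScanStep acc = pvMerge acc (l.foldl pvScanStep none) := by
  induction l generalizing acc with
  | nil => cases acc <;> simp [pvMerge]
  | cons x xs ih =>
    simp only [List.foldl_cons]
    rw [ih, ih (pvScanStep none x), pv_step_merge, pv_merge_assoc]

theorem pv_case_core (xs : List String) (s : Int) :
    pvMerge (some (0, s)) (pvScanSpec xs (s + 1)) = pvScanSpec ("core" :: xs) s := by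
  unfold pvScanSpec
  by_cases h1 : "core" ∈ xs <;> by_cases h2 : "tools" ∈ xs <;> by_cases h3 : "jobs" ∈ xs <;>
    simp [h1, h2, h3, pvMerge]

theorem pv_case_tools (xs : List String) (s : Int) :
    pvMerge (some (1, s)) (pvScanSpec xs (s + 1)) = pvScanSpec ("tools" :: xs) s := by
  unfold pvScanSpec
  have hne1 : ("tools" : String) ≠ "core" := by decide
  have hne2 : ("tools" : String) ≠ "jobs" := by decide
  rw [PySem.List.index?_cons_of_ne _ hne1, PySem.List.index?_cons_self,
      PySem.List.index?_cons_of_ne _ hne2]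
  by_cases h1 : "core" ∈ xs
  · obtain ⟨k1, hk1⟩ := Option.isSome_iff_exists.mp ((PySem.List.index?_isSome_iff xs "core").mpr h1)
    by_cases h2 : "tools" ∈ xs <;> by_cases h3 : "jobs" ∈ xs <;> simp_all [pvMerge] <;> omega
  · by_cases h2 : "tools" ∈ xs <;> by_cases h3 : "jobs" ∈ xs <;> simp_all [pvMerge]

theorem pv_case_jobs (xs : List String) (s : Int) :
    pvMerge (some (2, s)) (pvScanSpec xs (s + 1)) = pvScanSpec ("jobs" :: xs) s := by
  unfold pvScanSpec
  have hne1 : ("jobs" : String) ≠ "core" := by decide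
  have hne2 : ("jobs" : String) ≠ "tools" := by decide
  rw [PySem.List.index?_cons_of_ne _ hne1, PySem.List.index?_cons_of_ne _ hne2,
      PySem.List.index?_cons_self]
  by_cases h1 : "core" ∈ xs
  · obtain ⟨k1, hk1⟩ := Option.isSome_iff_exists.mp ((PySem.List.index?_isSome_iff xs "core").mpr h1)
    by_cases h2 : "tools" ∈ xs <;> by_cases h3 : "jobs" ∈ xs <;> simp_all [pvMerge] <;> omega
  · by_cases h2 : "tools" ∈ xs
    · obtain ⟨k2, hk2⟩ := Option.isSome_iff_exists.mp ((PySem.List.index?_isSome_iff xs "tools").mpr h2)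
      by_cases h3 : "jobs" ∈ xs <;> simp_all [pvMerge] <;> omega
    · by_cases h3 : "jobs" ∈ xs <;> simp_all [pvMerge]

theorem pv_case_other (x : String) (xs : List String) (s : Int)
    (hx1 : x ≠ "core") (hx2 : x ≠ "tools") (hx3 : x ≠ "jobs") :
    pvScanSpec xs (s + 1) = pvScanSpec (x :: xs) s := by
  unfold pvScanSpec
  rw [PySem.List.index?_cons_of_ne _ hx1, PySem.List.index?_cons_of_ne _ hx2,
      PySem.List.index?_cons_of_ne _ hx3]
  by_cases h1 : "core" ∈ xs
  · obtain ⟨k1, hk1⟩ := Option.isSome_iff_exists.mp ((PySem.List.index?_isSome_iff xs "core").mpr h1)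
    by_cases h2 : "tools" ∈ xs <;> by_cases h3 : "jobs" ∈ xs <;>
      simp_all [Ne.symm hx1] <;> omega
  · by_cases h2 : "tools" ∈ xs
    · obtain ⟨k2, hk2⟩ := Option.isSome_iff_exists.mp ((PySem.List.index?_isSome_iff xs "tools").mpr h2)
      by_cases h3 : "jobs" ∈ xs <;> simp_all [Ne.symm hx1, Ne.symm hx2] <;> omega
    · by_cases h3 : "jobs" ∈ xs
      · obtain ⟨k3, hk3⟩ := Option.isSome_iff_exists.mp ((PySem.List.index?_isSome_iff xs "jobs").mpr h3)
        simp_all [Ne.symm hx1, Ne.symm hx2, Ne.symm hx3]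
        omega
      · simp_all [Ne.symm hx1, Ne.symm hx2, Ne.symm hx3]

theorem pv_merge_spec (x : String) (xs : List String) (s : Int) :
    pvMerge (pvScanStep none (s, x)) (pvScanSpec xs (s + 1)) = pvScanSpec (x :: xs) s := by
  by_cases hx1 : x = "core"
  · subst hx1
    rw [show pvScanStep none ((s : Int), ("core" : String)) = some (0, s) from by
          simp [pvScanStep, pvPriority_get]]
    exact pv_case_core xs s
  · by_cases hx2 : x = "tools"
    · subst hx2
      rw [show pvScanStep none ((s : Int), ("tools" : String)) = some (1, s) from by
            simp [pvScanStep, pvPriority_get]]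
      exact pv_case_tools xs s
    · by_cases hx3 : x = "jobs"
      · subst hx3
        rw [show pvScanStep none ((s : Int), ("jobs" : String)) = some (2, s) from by
              simp [pvScanStep, pvPriority_get]]
        exact pv_case_jobs xs s
      · rw [show pvScanStep none ((s : Int), x) = none from by
              simp [pvScanStep, pvPriority_get, hx1, hx2, hx3]]
        rw [show pvMerge none (pvScanSpec xs (s + 1)) = pvScanSpec xs (s + 1) from rfl]
        exact pv_case_other x xs s hx1 hx2 hx3

theorem pv_scan_char (parts : List String) (s : Int) :
    (PySem.List.enumerate parts s).foldl pvScanStep none = pvScanSpec parts s := by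
  induction parts generalizing s with
  | nil => simp [PySem.List.enumerate_nil, pvScanSpec]
  | cons x xs ih =>
    rw [PySem.List.enumerate_cons, List.foldl_cons, pv_foldl_merge, ih]
    rw [pv_step_merge none (s, x), show pvMerge none (pvScanStep none (s, x)) = pvScanStep none (s, x) from by
          cases pvScanStep none (s, x) <;> rfl]
    exact pv_merge_spec x xs s

-- one found marker: A's indexed access equals B's Int-indexed access
theorem pv_hit (P : List String) (v : String) (k : Nat) (hk : PySem.List.index? P v = some k) :
    (if k + 1 < P.length then pvRemoveSuffix (P.getD (k + 1) "") ".py" else v)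
    = (if (0 : Int) + (k : Int) + 1 < (P.length : Int) then
         pvRemoveSuffix (PySem.List.pyGetD P ((0 : Int) + (k : Int) + 1) "") ".py"
       else PySem.List.pyGetD P ((0 : Int) + (k : Int)) "") := by
  obtain ⟨hklt, hkv, -⟩ := PySem.List.getElem_of_index?_eq_some hk
  by_cases hlt : k + 1 < P.length
  · rw [if_pos hlt, if_pos (by omega)]
    rw [show (0 : Int) + (k : Int) + 1 = ((k + 1 : Nat) : Int) from by omega,
        PySem.List.pyGetD_natCast]
  · rw [if_neg hlt, if_neg (by omega)]
    rw [show (0 : Int) + (k : Int) = ((k : Nat) : Int) from by omega,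
        PySem.List.pyGetD_natCast]
    rw [List.getD_eq_getElem _ _ hklt, hkv]

-- A's elif chain equals B's scan-based module, on any nonempty parts list
theorem pv_chain_eq (P : List String) (hp : P ≠ []) :
    (if P.contains "core" then
       let idx := (PySem.List.index? P "core").getD 0
       if idx + 1 < P.length then pvRemoveSuffix (P.getD (idx + 1) "") ".py" else "core"
     else if P.contains "tools" then
       let idx := (PySem.List.index? P "tools").getD 0
       if idx + 1 < P.length then pvRemoveSuffix (P.getD (idx + 1) "") ".py" else "tools"
     else if P.contains "jobs" then
       let idx := (PySem.List.index? P "jobs").getD 0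
       if idx + 1 < P.length then pvRemoveSuffix (P.getD (idx + 1) "") ".py" else "jobs"
     else if 2 ≤ P.length then PySem.List.pyGetD P (-2) ""
     else pvRemoveSuffix (P.getD 0 "") ".py")
    = (match (PySem.List.enumerate P).foldl pvScanStep none with
       | some b =>
         if b.2 + 1 < (P.length : Int) then pvRemoveSuffix (PySem.List.pyGetD P (b.2 + 1) "") ".py"
         else PySem.List.pyGetD P b.2 ""
       | none =>
         if 2 ≤ P.length then PySem.List.pyGetD P (-2) ""
         else if P ≠ [] then pvRemoveSuffix (P.getD 0 "") ".py"
         else "") := by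
  rw [pv_scan_char P 0]
  unfold pvScanSpec
  by_cases h1 : "core" ∈ P
  · obtain ⟨k1, hk1⟩ := Option.isSome_iff_exists.mp ((PySem.List.index?_isSome_iff P "core").mpr h1)
    simp only [h1, List.contains_eq_mem, decide_true, if_true, hk1, Option.getD_some]
    exact pv_hit P "core" k1 hk1
  · by_cases h2 : "tools" ∈ P
    · obtain ⟨k2, hk2⟩ := Option.isSome_iff_exists.mp ((PySem.List.index?_isSome_iff P "tools").mpr h2)
      simp only [h1, h2, List.contains_eq_mem, decide_true, decide_false, if_true, if_false,
        Bool.false_eq_true, hk2, Option.getD_some]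
      exact pv_hit P "tools" k2 hk2
    · by_cases h3 : "jobs" ∈ P
      · obtain ⟨k3, hk3⟩ := Option.isSome_iff_exists.mp ((PySem.List.index?_isSome_iff P "jobs").mpr h3)
        simp only [h1, h2, h3, List.contains_eq_mem, decide_true, decide_false, if_true, if_false,
          Bool.false_eq_true, hk3, Option.getD_some]
        exact pv_hit P "jobs" k3 hk3
      · simp only [h1, h2, h3, List.contains_eq_mem, decide_false, if_false, Bool.false_eq_true,
          hp, ne_eq, not_false_iff, if_true]

-- B's combined step function (module extraction + conditional append)
def pvG (acc : List String) (p : String) : List String :=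
  if pvModuleOf p != "" && !(acc.contains (pvModuleOf p)) then acc ++ [pvModuleOf p] else acc

theorem pv_astep_eq (acc : List String) (path : String) :
    (let p := PySem.Str.strip (PySem.Str.replace path "\\" "/")
     let parts := ((PySem.Str.split? p "/").getD []).filter (fun x => x != "")
     if parts = [] then acc
     else
       let module :=
         if parts.contains "core" then
           let idx := (PySem.List.index? parts "core").getD 0
           if idx + 1 < parts.length then pvRemoveSuffix (parts.getD (idx + 1) "") ".py" else "core"
         else if parts.contains "tools" then
           let idx := (PySem.List.index? parts "tools").getD 0
           if idx + 1 < parts.length then pvRemoveSuffix (parts.getD (idx + 1) "") ".py" else "tools"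
         else if parts.contains "jobs" then
           let idx := (PySem.List.index? parts "jobs").getD 0
           if idx + 1 < parts.length then pvRemoveSuffix (parts.getD (idx + 1) "") ".py" else "jobs"
         else if 2 ≤ parts.length then PySem.List.pyGetD parts (-2) ""
         else pvRemoveSuffix (parts.getD 0 "") ".py"
       if module != "" && !(acc.contains module) then acc ++ [module] else acc)
    = pvG acc path := by
  show (if pvPartsOf path = [] then acc
        else
          let module :=
            if (pvPartsOf path).contains "core" then
              let idx := (PySem.List.index? (pvPartsOf path) "core").getD 0
              if idx + 1 < (pvPartsOf path).length then pvRemoveSuffix ((pvPartsOf path).getD (idx + 1) "") ".py" else "core"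
            else if (pvPartsOf path).contains "tools" then
              let idx := (PySem.List.index? (pvPartsOf path) "tools").getD 0
              if idx + 1 < (pvPartsOf path).length then pvRemoveSuffix ((pvPartsOf path).getD (idx + 1) "") ".py" else "tools"
            else if (pvPartsOf path).contains "jobs" then
              let idx := (PySem.List.index? (pvPartsOf path) "jobs").getD 0
              if idx + 1 < (pvPartsOf path).length then pvRemoveSuffix ((pvPartsOf path).getD (idx + 1) "") ".py" else "jobs"
            else if 2 ≤ (pvPartsOf path).length then PySem.List.pyGetD (pvPartsOf path) (-2) ""
            else pvRemoveSuffix ((pvPartsOf path).getD 0 "") ".py"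
          if module != "" && !(acc.contains module) then acc ++ [module] else acc)
    = pvG acc path
  unfold pvG pvModuleOf
  generalize pvPartsOf path = P
  by_cases hp : P = []
  · subst hp
    simp [PySem.List.enumerate_nil]
  · rw [if_neg hp]
    show (let module :=
            if P.contains "core" then
              let idx := (PySem.List.index? P "core").getD 0
              if idx + 1 < P.length then pvRemoveSuffix (P.getD (idx + 1) "") ".py" else "core"
            else if P.contains "tools" then
              let idx := (PySem.List.index? P "tools").getD 0
              if idx + 1 < P.length then pvRemoveSuffix (P.getD (idx + 1) "") ".py" else "tools"
            else if P.contains "jobs" then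
              let idx := (PySem.List.index? P "jobs").getD 0
              if idx + 1 < P.length then pvRemoveSuffix (P.getD (idx + 1) "") ".py" else "jobs"
            else if 2 ≤ P.length then PySem.List.pyGetD P (-2) ""
            else pvRemoveSuffix (P.getD 0 "") ".py"
          if module != "" && !(acc.contains module) then acc ++ [module] else acc)
      = (let m :=
           match (PySem.List.enumerate P).foldl pvScanStep none with
           | some b =>
             if b.2 + 1 < (P.length : Int) then pvRemoveSuffix (PySem.List.pyGetD P (b.2 + 1) "") ".py"
             else PySem.List.pyGetD P b.2 ""
           | none =>
             if 2 ≤ P.length then PySem.List.pyGetD P (-2) ""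
             else if P ≠ [] then pvRemoveSuffix (P.getD 0 "") ".py"
             else ""
         if m != "" && !(acc.contains m) then acc ++ [m] else acc)
    rw [← pv_chain_eq P hp]

theorem pv_prefix_foldl (ms : List String) (acc : List String) :
    acc <+: ms.foldl pvG acc := by
  induction ms generalizing acc with
  | nil => exact List.prefix_refl _
  | cons p ps ih =>
    rw [List.foldl_cons]
    refine List.IsPrefix.trans ?_ (ih (pvG acc p))
    unfold pvG
    split_ifs
    · exact List.prefix_append acc _
    · exact List.prefix_refl acc

theorem pv_collect_eq (ms : List String) (acc : List String) (h : acc.length ≤ 20) :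
    pvCollect acc ms = (ms.foldl pvG acc).take 20 := by
  induction ms generalizing acc with
  | nil =>
    simp only [pvCollect, List.foldl_nil]
    exact (List.take_of_length_le h).symm
  | cons p ps ih =>
    by_cases h20 : acc.length = 20
    · obtain ⟨t, ht⟩ := pv_prefix_foldl (p :: ps) acc
      simp only [pvCollect, if_pos h20]
      rw [← ht, ← h20, List.take_left]
    · have hlen : (pvG acc p).length ≤ 20 := by
        have hlt : acc.length < 20 := lt_of_le_of_ne h h20
        unfold pvG
        split_ifs
        · simp only [List.length_append, List.length_cons, List.length_nil]
          omega
        · omega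
      simp only [pvCollect, if_neg h20, List.foldl_cons]
      exact ih (pvG acc p) hlen

-- ===== VERDICT (by name: the statement is the Claim_ definition above) =====
theorem infer_modules_spec : Claim_equal_infer_modules := by
  intro paths _
  show infer_modules paths = infer_modules_alt paths
  unfold infer_modules infer_modules_alt
  rw [show paths.foldl _ ([] : List String) = paths.foldl pvG [] from
        PySem.List.foldl_congr_mem _ _ _ _ (fun acc p _ => pv_astep_eq acc p)]
  rw [PySem.List.slice_to _ (b := 20) (by norm_num)]
  rw [pv_collect_eq paths [] (by simp)]
  rfl
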